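-- pv_equiv track=rewrite | github.com/LaRenaiocco/job-practice | scrambies.py | scramble
-- ===== SOURCE A (Python) =====
-- def scramble(s1, s2):
--     dict2 = {}
--     for char in s2:
--         dict2[char] = dict2.get(char, 0) + 1
--     for char in s1:
--         value = dict2.get(char)
--         if value != None and value > 0:
--             dict2[char] = value -1
--     values = dict2.values()
--     for item in values:
--         if item != 0:
--             return False
--     return True
-- ===== SOURCE B (Python) =====
-- def scramble(s1, s2):
--     return all(s1.count(c) >= s2.count(c) for c in set(s2))
-- ===== Notes on version B (the rewrite author's own statement) =====
-- stated objective: idiomatic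
-- what changed: Replaces A's mutable frequency dict (build counts from s2, decrement while scanning s1, then check all values are zero) with a one-line all() over the distinct characters of s2 comparing s1.count(c) >= s2.count(c); the scans run in C-level str.count instead of a Python-level loop.
import Mathlib
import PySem

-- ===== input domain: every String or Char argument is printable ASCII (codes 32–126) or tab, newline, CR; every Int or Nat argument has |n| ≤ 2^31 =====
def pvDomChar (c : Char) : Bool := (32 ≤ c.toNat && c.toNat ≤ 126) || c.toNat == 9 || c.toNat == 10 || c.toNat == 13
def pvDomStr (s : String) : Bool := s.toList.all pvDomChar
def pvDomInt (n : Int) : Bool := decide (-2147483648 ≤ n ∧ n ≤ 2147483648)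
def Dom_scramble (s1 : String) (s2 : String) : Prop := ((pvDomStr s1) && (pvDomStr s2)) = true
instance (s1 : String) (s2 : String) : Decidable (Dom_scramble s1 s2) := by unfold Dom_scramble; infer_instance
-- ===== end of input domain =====

-- B replaces A's build-then-decrement frequency dict with an all() over set(s2) comparing per-character counts (idiomatic, not faster).

-- ===== PORT A =====
-- one decrement step of A's second loop: value = dict2.get(char); if value != None and value > 0: dict2[char] = value - 1
def scrambleStep (d : PySem.Dict Char Int) (c : Char) : PySem.Dict Char Int :=
  match d.get? c with
  | none => d
  | some v => if v > 0 then d.insert c (v - 1) else d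

def scramble (s1 : String) (s2 : String) : Bool :=
  let dict2 := s2.toList.foldl (fun d c => d.insert c (d.getD c 0 + 1)) PySem.Dict.empty
  let dict2 := s1.toList.foldl scrambleStep dict2
  -- for item in dict2.values(): if item != 0: return False  /  return True
  dict2.values.all (fun item => item == 0)

-- ===== PORT B =====
def scramble_alt (s1 : String) (s2 : String) : Bool :=
  (PySem.Set.ofList s2.toList).all (fun c => decide (s2.toList.count c ≤ s1.toList.count c))

-- ===== PRECONDITION & SPEC =====
def Spec_scramble (s1 : String) (s2 : String) (out : Bool) : Prop := out = scramble_alt s1 s2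
instance (s1 : String) (s2 : String) (out : Bool) : Decidable (Spec_scramble s1 s2 out) := by unfold Spec_scramble; infer_instance

-- ===== CLAIM (what is proved, stated in full; the proofs are below) =====
def Claim_equal_scramble : Prop := ∀ (s1 : String) (s2 : String), Dom_scramble s1 s2 → Spec_scramble s1 s2 (scramble s1 s2)

-- ===== LEMMAS AND PROOFS =====
theorem contains_of_get?_eq_some (d : PySem.Dict Char Int) (k : Char) (v : Int)
    (h : d.get? k = some v) : d.contains k = true := by
  simp only [PySem.Dict.contains, PySem.Dict.get?] at *
  rcases Option.map_eq_some_iff.mp h with ⟨p, hp, _⟩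
  have h1 : p ∈ d.items := List.mem_of_find?_eq_some hp
  have h2 : (p.1 == k) = true := List.find?_some (p := fun q : Char × Int => q.1 == k) hp
  exact List.any_eq_true.mpr ⟨p, h1, h2⟩

theorem get?_of_contains (d : PySem.Dict Char Int) (k : Char) (h : d.contains k = true) :
    d.get? k = some (d.getD k 0) := by
  rw [PySem.Dict.getD_eq_get?_getD]
  simp only [PySem.Dict.contains, PySem.Dict.get?] at *
  cases hf : List.find? (fun p => p.1 == k) d.items with
  | none =>
    exfalso
    obtain ⟨p, hp, hpc⟩ := List.any_eq_true.mp h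
    exact absurd hpc (by simpa using List.find?_eq_none.mp hf p hp)
  | some p => simp

theorem keys_scrambleStep (d : PySem.Dict Char Int) (c : Char) :
    (scrambleStep d c).keys = d.keys := by
  unfold scrambleStep
  cases h : d.get? c with
  | none => rfl
  | some v =>
    by_cases hv : v > 0
    · simp only [hv, if_pos]
      exact PySem.Dict.keys_insert_of_contains d _ (contains_of_get?_eq_some d c v h)
    · simp [hv]

theorem keys_foldl_scrambleStep (l : List Char) (d : PySem.Dict Char Int) :
    (l.foldl scrambleStep d).keys = d.keys := by
  induction l generalizing d with
  | nil => rfl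
  | cons x l ih => rw [List.foldl_cons, ih, keys_scrambleStep]

theorem get?_foldl_scrambleStep (l : List Char) (d : PySem.Dict Char Int) (c : Char) (v : Int)
    (h : d.get? c = some v) (hv : 0 ≤ v) :
    (l.foldl scrambleStep d).get? c = some (max (v - l.count c) 0) := by
  induction l generalizing d v with
  | nil => simp only [List.foldl_nil, List.count_nil]; rw [h]; congr 1; omega
  | cons x l ih =>
    rw [List.foldl_cons]
    by_cases hx : x = c
    · subst hx
      by_cases hvp : v > 0
      · have hstep : scrambleStep d x = d.insert x (v - 1) := by
          unfold scrambleStep; rw [h]; simp [hvp]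
        rw [hstep, ih _ (v - 1) (PySem.Dict.get?_insert_self d x (v - 1)) (by omega),
          List.count_cons_self]
        congr 1
        push_cast
        omega
      · have hstep : scrambleStep d x = d := by
          unfold scrambleStep; rw [h]; simp [hvp]
        rw [hstep, ih _ v h hv, List.count_cons_self]
        congr 1
        push_cast
        omega
    · have hstep : (scrambleStep d x).get? c = d.get? c := by
        unfold scrambleStep
        cases hgx : d.get? x with
        | none => rfl
        | some w =>
          by_cases hw : w > 0
          · simp only [hw, if_pos]
            exact PySem.Dict.get?_insert_of_ne d _ (fun hh => hx hh.symm)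
          · simp [hw]
      rw [ih _ v (hstep.trans h) hv, List.count_cons_of_ne hx]

-- ===== VERDICT (by name: the statement is the Claim_ definition above) =====
theorem scramble_spec : Claim_equal_scramble := by
  intro s1 s2 _
  unfold Spec_scramble
  simp only [scramble, scramble_alt]
  set d1 : PySem.Dict Char Int :=
    s2.toList.foldl (fun d c => d.insert c (d.getD c 0 + 1)) PySem.Dict.empty with hd1
  have hcounter : d1 = PySem.Dict.counter s2.toList :=
    PySem.Dict.foldl_insert_getD_add_one_eq_counter s2.toList
  set d2 : PySem.Dict Char Int := s1.toList.foldl scrambleStep d1 with hd2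
  have hkeys : d2.keys = PySem.Set.ofList s2.toList := by
    rw [hd2, keys_foldl_scrambleStep, hcounter, PySem.Dict.keys_counter]
  have hnd : d2.keys.Nodup := by
    rw [hd2, keys_foldl_scrambleStep, hcounter]
    exact PySem.Dict.nodup_keys_counter s2.toList
  rw [PySem.Dict.values_eq_map_keys d2 hnd 0, List.all_map, hkeys]
  have hval : ∀ c ∈ PySem.Set.ofList s2.toList,
      d2.getD c 0 = max ((s2.toList.count c : Int) - s1.toList.count c) 0 := by
    intro c hc
    have hmem : c ∈ s2.toList := (PySem.Set.mem_ofList s2.toList c).mp hc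
    have hcon : d1.contains c = true := by
      rw [hcounter, PySem.Dict.contains_counter]
      exact List.elem_eq_true_of_mem hmem
    have hgd : d1.getD c 0 = (s2.toList.count c : Int) := by
      rw [hcounter]; exact PySem.Dict.getD_counter s2.toList c
    have hget1 : d1.get? c = some (s2.toList.count c : Int) := by
      rw [get?_of_contains d1 c hcon, hgd]
    have hg2 := get?_foldl_scrambleStep s1.toList d1 c (s2.toList.count c : Int) hget1
      (Int.natCast_nonneg _)
    rw [← hd2] at hg2
    rw [PySem.Dict.getD_eq_get?_getD, hg2]
    rfl
  rw [Bool.eq_iff_iff, List.all_eq_true, List.all_eq_true]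
  constructor
  · intro h c hc
    have hh := h c hc
    rw [Function.comp_apply, hval c hc, beq_iff_eq] at hh
    simp only [decide_eq_true_eq]
    omega
  · intro h c hc
    have hh := h c hc
    rw [Function.comp_apply, hval c hc, beq_iff_eq]
    simp only [decide_eq_true_eq] at hh
    omega
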